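-- pv_equiv track=rewrite | github.com/wittachai-as/WordCraft | ai_service/main.py | is_valid_result_word
-- ===== SOURCE A (Python) =====
-- def is_valid_result_word(w: str) -> bool:
--   """
--   ตรวจสอบว่าคำที่ได้จาก AI ผ่านเกณฑ์คุณภาพหรือไม่
--   (เกณฑ์เดียวกับการกรอง vocabulary สำหรับโจทย์)
--   """
--   # Must be alphabetic (no hyphen, no underscore, no numbers)
--   if not (w.isalpha() and w.islower() and '_' not in w):
--     return False
--
--   # Must be reasonable length (3-20 chars)
--   if len(w) < 3 or len(w) > 20:
--     return False
--
--   # Must be ASCII only (no foreign characters)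
--   if not all(ord(c) < 128 for c in w):
--     return False
--
--   # No repetitive patterns (3+ same chars in a row)
--   if any(c*3 in w for c in 'abcdefghijklmnopqrstuvwxyz'):
--     return False
--
--   # Not in excluded words or profanity lists
--   if w in EXCLUDED_WORDS or w in PROFANITY_WORDS:
--     return False
--
--   return True
--
-- EXCLUDED_WORDS = {
--   # Articles
--   'a', 'an', 'the',
--   # Personal pronouns
--   'i', 'you', 'he', 'she', 'it', 'we', 'they',
--   'me', 'him', 'her', 'us', 'them',
--   # Possessive pronouns
--   'my', 'your', 'his', 'her', 'its', 'our', 'their',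
--   'mine', 'yours', 'hers', 'ours', 'theirs',
--   # Demonstrative pronouns
--   'this', 'that', 'these', 'those',
--   # Relative pronouns
--   'who', 'whom', 'whose', 'which', 'what',
--   # Reflexive pronouns
--   'myself', 'yourself', 'himself', 'herself', 'itself',
--   'ourselves', 'yourselves', 'themselves',
--   # Common conjunctions and prepositions (1-2 letters)
--   'of', 'to', 'in', 'on', 'at', 'by', 'or', 'if', 'as', 'so',
--   'up', 'no', 'do', 'go', 'am', 'is',
--   # Single letters
--   'a', 'i', 's', 't', 'b', 'c', 'd', 'e', 'f', 'g', 'h', 'j',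
--   'k', 'l', 'm', 'n', 'o', 'p', 'q', 'r', 'u', 'v', 'w', 'x', 'y', 'z'
-- }
--
-- PROFANITY_WORDS = {
--   'ass', 'arse', 'asshole', 'bastard', 'bitch', 'bollocks', 'bugger',
--   'cock', 'crap', 'cunt', 'damn', 'dick', 'dickhead', 'fag', 'faggot',
--   'fuck', 'fucker', 'fucking', 'hell', 'motherfucker', 'nigga', 'nigger',
--   'piss', 'prick', 'pussy', 'shit', 'shite', 'slut', 'tit', 'tits',
--   'twat', 'wank', 'wanker', 'whore', 'goddamn', 'bloody', 'bollox',
--   'arsehole', 'bellend', 'bullshit', 'shitty', 'retard', 'retarded',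
--   'coon', 'spic', 'chink', 'gook', 'kike', 'dyke', 'homo', 'tranny'
-- }
-- ===== SOURCE B (Python) =====
-- # All banned words: EXCLUDED_WORDS and PROFANITY_WORDS merged into one word list.
-- _BANNED_WORDS = (
--     'a', 'an', 'the', 'i', 'you', 'he', 'she', 'it', 'we', 'they',
--     'me', 'him', 'her', 'us', 'them',
--     'my', 'your', 'his', 'its', 'our', 'their',
--     'mine', 'yours', 'hers', 'ours', 'theirs',
--     'this', 'that', 'these', 'those',
--     'who', 'whom', 'whose', 'which', 'what',
--     'myself', 'yourself', 'himself', 'herself', 'itself',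
--     'ourselves', 'yourselves', 'themselves',
--     'of', 'to', 'in', 'on', 'at', 'by', 'or', 'if', 'as', 'so',
--     'up', 'no', 'do', 'go', 'am', 'is',
--     's', 't', 'b', 'c', 'd', 'e', 'f', 'g', 'h', 'j',
--     'k', 'l', 'm', 'n', 'o', 'p', 'q', 'r', 'u', 'v', 'w', 'x', 'y', 'z',
--     'ass', 'arse', 'asshole', 'bastard', 'bitch', 'bollocks', 'bugger',
--     'cock', 'crap', 'cunt', 'damn', 'dick', 'dickhead', 'fag', 'faggot',
--     'fuck', 'fucker', 'fucking', 'hell', 'motherfucker', 'nigga', 'nigger',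
--     'piss', 'prick', 'pussy', 'shit', 'shite', 'slut', 'tit', 'tits',
--     'twat', 'wank', 'wanker', 'whore', 'goddamn', 'bloody', 'bollox',
--     'arsehole', 'bellend', 'bullshit', 'shitty', 'retard', 'retarded',
--     'coon', 'spic', 'chink', 'gook', 'kike', 'dyke', 'homo', 'tranny')
--
--
-- def is_valid_result_word(w: str) -> bool:
--     # One pass: every char must be a-z, and no run of 3 equal chars.
--     run = 0
--     prev = None
--     for c in w:
--         if not ('a' <= c <= 'z'):
--             return False
--         run = run + 1 if c == prev else 1
--         if run == 3:
--             return False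
--         prev = c
--     return 3 <= len(w) <= 20 and w not in _BANNED_WORDS
-- ===== Notes on version B (the rewrite author's own statement) =====
-- stated objective: simpler
-- what changed: B replaces A's staged guards (isalpha/islower/underscore, length, ASCII scan, 26 per-letter substring searches, two set lookups) by one single-pass state machine over the characters that simultaneously enforces a-z-only and rejects a run of 3 equal characters, followed by a length bound and one membership test in a single merged banned-word list.
import Mathlib
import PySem

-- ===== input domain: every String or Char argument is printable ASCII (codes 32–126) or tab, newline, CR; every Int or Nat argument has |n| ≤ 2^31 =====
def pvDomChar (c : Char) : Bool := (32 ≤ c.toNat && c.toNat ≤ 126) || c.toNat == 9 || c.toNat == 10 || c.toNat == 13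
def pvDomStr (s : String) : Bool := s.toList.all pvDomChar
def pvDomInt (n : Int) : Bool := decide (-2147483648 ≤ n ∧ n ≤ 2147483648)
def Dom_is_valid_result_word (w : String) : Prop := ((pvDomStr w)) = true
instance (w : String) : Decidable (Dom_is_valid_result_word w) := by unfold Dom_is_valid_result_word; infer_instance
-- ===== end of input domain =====

-- B: one single-pass a-z + triple-run scan and one merged banned-word list replace A's staged
-- guards and 26 substring searches (objective: simpler).


-- ===== PORT A =====
-- A's module-level set literals
def pvExcludedWords : PySem.Set String := PySem.Set.ofList
  ["a", "an", "the",
   "i", "you", "he", "she", "it", "we", "they",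
   "me", "him", "her", "us", "them",
   "my", "your", "his", "her", "its", "our", "their",
   "mine", "yours", "hers", "ours", "theirs",
   "this", "that", "these", "those",
   "who", "whom", "whose", "which", "what",
   "myself", "yourself", "himself", "herself", "itself",
   "ourselves", "yourselves", "themselves",
   "of", "to", "in", "on", "at", "by", "or", "if", "as", "so",
   "up", "no", "do", "go", "am", "is",
   "a", "i", "s", "t", "b", "c", "d", "e", "f", "g", "h", "j",
   "k", "l", "m", "n", "o", "p", "q", "r", "u", "v", "w", "x", "y", "z"]

def pvProfanityWords : PySem.Set String := PySem.Set.ofList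
  ["ass", "arse", "asshole", "bastard", "bitch", "bollocks", "bugger",
   "cock", "crap", "cunt", "damn", "dick", "dickhead", "fag", "faggot",
   "fuck", "fucker", "fucking", "hell", "motherfucker", "nigga", "nigger",
   "piss", "prick", "pussy", "shit", "shite", "slut", "tit", "tits",
   "twat", "wank", "wanker", "whore", "goddamn", "bloody", "bollox",
   "arsehole", "bellend", "bullshit", "shitty", "retard", "retarded",
   "coon", "spic", "chink", "gook", "kike", "dyke", "homo", "tranny"]

def pvAlphabet : List Char :=
  ['a','b','c','d','e','f','g','h','i','j','k','l','m','n','o','p','q','r','s','t','u','v','w','x','y','z']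

def is_valid_result_word (w : String) : Bool :=
  -- w.isalpha() and w.islower() and '_' not in w
  -- (islower() ported as "some lowercase char and no uppercase char": exact on the ASCII domain)
  if !(PySem.Str.strIsalpha w
        && (w.toList.any PySem.Chars.islower && w.toList.all (fun c => !PySem.Chars.isupper c))
        && !PySem.Str.isIn "_" w) then false
  -- len(w) < 3 or len(w) > 20
  else if PySem.Str.len w < 3 || 20 < PySem.Str.len w then false
  -- not all(ord(c) < 128 for c in w)
  else if !(w.toList.all (fun c => decide (c.toNat < 128))) then false
  -- any(c*3 in w for c in 'abcdefghijklmnopqrstuvwxyz')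
  else if pvAlphabet.any (fun c => PySem.Chars.isIn [c, c, c] w.toList) then false
  -- w in EXCLUDED_WORDS or w in PROFANITY_WORDS
  else if PySem.Set.contains pvExcludedWords w || PySem.Set.contains pvProfanityWords w then false
  else true

-- ===== PORT B =====
-- B's merged banned-word list: one flat tuple of words
def pvBannedWords : List String :=
  ["a", "an", "the", "i", "you", "he", "she", "it", "we", "they",
   "me", "him", "her", "us", "them",
   "my", "your", "his", "its", "our", "their",
   "mine", "yours", "hers", "ours", "theirs",
   "this", "that", "these", "those",
   "who", "whom", "whose", "which", "what",
   "myself", "yourself", "himself", "herself", "itself",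
   "ourselves", "yourselves", "themselves",
   "of", "to", "in", "on", "at", "by", "or", "if", "as", "so",
   "up", "no", "do", "go", "am", "is",
   "s", "t", "b", "c", "d", "e", "f", "g", "h", "j",
   "k", "l", "m", "n", "o", "p", "q", "r", "u", "v", "w", "x", "y", "z",
   "ass", "arse", "asshole", "bastard", "bitch", "bollocks", "bugger",
   "cock", "crap", "cunt", "damn", "dick", "dickhead", "fag", "faggot",
   "fuck", "fucker", "fucking", "hell", "motherfucker", "nigga", "nigger",
   "piss", "prick", "pussy", "shit", "shite", "slut", "tit", "tits",
   "twat", "wank", "wanker", "whore", "goddamn", "bloody", "bollox",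
   "arsehole", "bellend", "bullshit", "shitty", "retard", "retarded",
   "coon", "spic", "chink", "gook", "kike", "dyke", "homo", "tranny"]

-- B's for-loop: one pass carrying (run, prev); early return False becomes result false
def pvScan : List Char → Int → Option Char → Bool
  | [], _, _ => true
  | c :: rest, run, prev =>
    if !(decide ('a' ≤ c) && decide (c ≤ 'z')) then false
    else
      let run' : Int := if some c == prev then run + 1 else 1
      if run' == 3 then false
      else pvScan rest run' (some c)

def is_valid_result_word_alt (w : String) : Bool :=
  if pvScan w.toList 0 none then
    decide (3 ≤ PySem.Str.len w) && decide (PySem.Str.len w ≤ 20)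
      && !(pvBannedWords.contains w)
  else false

-- ===== PRECONDITION & SPEC =====
def Spec_is_valid_result_word (w : String) (out : Bool) : Prop := out = is_valid_result_word_alt w
instance (w : String) (out : Bool) : Decidable (Spec_is_valid_result_word w out) := by unfold Spec_is_valid_result_word; infer_instance

-- ===== CLAIM (what is proved, stated in full; the proofs are below) =====
def Claim_equal_is_valid_result_word : Prop := ∀ (w : String), Dom_is_valid_result_word w → Spec_is_valid_result_word w (is_valid_result_word w)

-- ===== LEMMAS AND PROOFS =====

-- proof-side helper: "some character appears 3 times in a row"
def pvHasTriple : List Char → Bool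
  | a :: b :: c :: rest => (a == b && b == c) || pvHasTriple (b :: c :: rest)
  | _ => false

theorem islower_toNat {c : Char} (h : PySem.Chars.islower c = true) :
    97 ≤ c.toNat ∧ c.toNat ≤ 122 := by
  simp [PySem.Chars.islower, Char.le_def, UInt32.le_iff_toNat_le] at h
  exact h

theorem not_isupper_of_islower {c : Char} (h : PySem.Chars.islower c = true) :
    PySem.Chars.isupper c = false := by
  have := islower_toNat h
  simp [PySem.Chars.isupper, Char.le_def, UInt32.le_iff_toNat_le]
  omega

theorem mem_pvAlphabet {c : Char} (h : PySem.Chars.islower c = true) : c ∈ pvAlphabet := by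
  obtain ⟨h1, h2⟩ := islower_toNat h
  rw [← Char.ofNat_toNat c]
  interval_cases h3 : c.toNat <;> decide

theorem pvHasTriple_iff (cs : List Char) :
    pvHasTriple cs = true ↔ ∃ a : Char, [a, a, a] <:+: cs := by
  fun_induction pvHasTriple cs with
  | case1 a b c rest ih =>
    simp only [Bool.or_eq_true, Bool.and_eq_true, beq_iff_eq, ih]
    constructor
    · rintro (⟨rfl, rfl⟩ | ⟨x, hx⟩)
      · exact ⟨a, (by simp : [a,a,a] <+: a::a::a::rest).isInfix⟩
      · exact ⟨x, hx.trans (List.suffix_cons a _).isInfix⟩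
    · rintro ⟨x, hx⟩
      rcases List.infix_cons_iff.1 hx with hp | ht
      · simp [List.cons_prefix_cons] at hp
        obtain ⟨rfl, rfl, rfl, -⟩ := hp
        exact Or.inl ⟨rfl, rfl⟩
      · exact Or.inr ⟨x, ht⟩
  | case2 l h =>
    simp only [Bool.false_eq_true, false_iff]
    rintro ⟨x, hx⟩
    have hl := hx.length_le
    match l, h, hl with
    | a :: b :: c :: r, h, _ => exact h a b c r rfl
    | [], _, hl => simp at hl
    | [a], _, hl => simp at hl
    | [a, b], _, hl => simp at hl

-- A's repetition test agrees with pvHasTriple on all-lowercase strings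
theorem triple_agree {cs : List Char} (hlow : cs.all PySem.Chars.islower = true) :
    pvAlphabet.any (fun c => PySem.Chars.isIn [c, c, c] cs) = pvHasTriple cs := by
  rw [List.all_eq_true] at hlow
  cases htrip : pvHasTriple cs with
  | true =>
    obtain ⟨x, hx⟩ := (pvHasTriple_iff cs).1 htrip
    have hxmem : x ∈ cs := hx.subset (by simp)
    rw [List.any_eq_true]
    refine ⟨x, mem_pvAlphabet (hlow x hxmem), ?_⟩
    exact (PySem.Chars.isIn_iff_infix _ _).2 hx
  | false =>
    rw [List.any_eq_false]
    intro c _ hIn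
    have hinf := (PySem.Chars.isIn_iff_infix _ _).1 hIn
    exact absurd ((pvHasTriple_iff cs).2 ⟨c, hinf⟩) (by simp [htrip])

theorem pvHasTriple_cons_ne {p c : Char} {rest : List Char} (h : p ≠ c) :
    pvHasTriple (p :: c :: rest) = pvHasTriple (c :: rest) := by
  cases rest with
  | nil => simp [pvHasTriple]
  | cons x r => simp [pvHasTriple, h]

theorem pvToNatTwo : (2 : Int).toNat = 2 := rfl

-- invariant of B's scan: run ∈ {1,2} copies of prev are already pending
theorem pvScan_invariant (cs : List Char) : ∀ (p : Char) (r : Int), r = 1 ∨ r = 2 →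
    pvScan cs r (some p)
      = (cs.all PySem.Chars.islower && !pvHasTriple (List.replicate r.toNat p ++ cs)) := by
  induction cs with
  | nil =>
    rintro p r (rfl | rfl) <;>
      simp [pvScan, pvHasTriple, List.replicate_succ, List.replicate_zero,
        Int.toNat_one, pvToNatTwo]
  | cons c rest ih =>
    rintro p r hr
    by_cases hc : PySem.Chars.islower c = true
    · have hc' : (decide ('a' ≤ c) && decide (c ≤ 'z')) = true := hc
      by_cases hpc : c = p
      · subst hpc
        rcases hr with rfl | rfl
        · -- run 1 → 2
          have hstep : pvScan (c :: rest) 1 (some c) = pvScan rest 2 (some c) := by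
            simp [pvScan, hc']
          rw [hstep, ih c 2 (Or.inr rfl)]
          simp [hc, List.replicate_succ, Int.toNat_one, pvToNatTwo]
        · -- run 2 → 3: reject; the padded list has the triple
          have hstep : pvScan (c :: rest) 2 (some c) = false := by
            simp [pvScan, hc']
          rw [hstep]
          simp [List.replicate_succ, pvToNatTwo, pvHasTriple]
      · have hstep : pvScan (c :: rest) r (some p) = pvScan rest 1 (some c) := by
          simp [pvScan, hc', hpc]
        rw [hstep, ih c 1 (Or.inl rfl)]
        have hp' : p ≠ c := fun h => hpc h.symm
        have hpad : pvHasTriple (List.replicate r.toNat p ++ c :: rest)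
            = pvHasTriple (c :: rest) := by
          rcases hr with rfl | rfl
          · simpa [Int.toNat_one] using pvHasTriple_cons_ne (rest := rest) hp'
          · have h2 : List.replicate (Int.toNat 2) p ++ c :: rest
                = p :: p :: c :: rest := by simp [List.replicate_succ, pvToNatTwo]
            rw [h2, show pvHasTriple (p :: p :: c :: rest)
                = ((p == p && p == c) || pvHasTriple (p :: c :: rest)) from rfl]
            simp [hp', pvHasTriple_cons_ne (rest := rest) hp']
        rw [hpad]
        simp [hc, List.replicate_succ, Int.toNat_one]
    · have hc' : (decide ('a' ≤ c) && decide (c ≤ 'z')) = false := by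
        simpa [PySem.Chars.islower] using hc
      have hstep : pvScan (c :: rest) r (some p) = false := by
        simp [pvScan, hc']
      rw [hstep]
      have : PySem.Chars.islower c = false := by simpa using hc
      simp [this]

theorem pvScan_spec (cs : List Char) :
    pvScan cs 0 none = (cs.all PySem.Chars.islower && !pvHasTriple cs) := by
  cases cs with
  | nil => simp [pvScan, pvHasTriple]
  | cons c rest =>
    by_cases hc : PySem.Chars.islower c = true
    · have hc' : (decide ('a' ≤ c) && decide (c ≤ 'z')) = true := hc
      have hstep : pvScan (c :: rest) 0 none = pvScan rest 1 (some c) := by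
        simp [pvScan, hc']
      rw [hstep, pvScan_invariant rest c 1 (Or.inl rfl)]
      simp [hc, Int.toNat_one]
    · have hc' : (decide ('a' ≤ c) && decide (c ≤ 'z')) = false := by
        simpa [PySem.Chars.islower] using hc
      have hstep : pvScan (c :: rest) 0 none = false := by
        simp [pvScan, hc']
      rw [hstep]
      have : PySem.Chars.islower c = false := by simpa using hc
      simp [this]

-- the merged banned list is literally A's excluded set followed by its profanity set
set_option maxRecDepth 100000 in
theorem banned_split :
    pvBannedWords = (pvExcludedWords : List String) ++ pvProfanityWords := by
  decide

set_option maxRecDepth 100000 in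
theorem banned_eq (w : String) :
    pvBannedWords.contains w
      = (PySem.Set.contains pvExcludedWords w || PySem.Set.contains pvProfanityWords w) := by
  show pvBannedWords.contains w
      = ((pvExcludedWords : List String).contains w || (pvProfanityWords : List String).contains w)
  rw [banned_split]
  simp

theorem main_eq (w : String) : is_valid_result_word w = is_valid_result_word_alt w := by
  simp only [is_valid_result_word, is_valid_result_word_alt, pvScan_spec, banned_eq]
  by_cases hlow : w.toList.all PySem.Chars.islower = true
  · -- all lowercase: A's first and third guards pass
    have hall := List.all_eq_true.1 hlow
    by_cases hne : w.toList = []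
    · -- empty string: A fails isalpha, B fails the length bound
      simp [hne, pvHasTriple]
    · have halpha : PySem.Str.strIsalpha w = true := by
        simp [PySem.Str.strIsalpha, PySem.Chars.strIsalpha, List.all_eq_true, hne]
        intro c hc
        simp [PySem.Chars.isalpha, hall c hc]
      have hany : w.toList.any PySem.Chars.islower = true := by
        rw [List.any_eq_true]
        obtain ⟨c, hc⟩ := List.exists_mem_of_ne_nil _ hne
        exact ⟨c, hc, hall c hc⟩
      have hnoup : w.toList.all (fun c => !PySem.Chars.isupper c) = true := by
        rw [List.all_eq_true]
        intro c hc
        simp [not_isupper_of_islower (hall c hc)]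
      have hus : PySem.Str.isIn "_" w = false := by
        rw [PySem.Str.isIn_eq]
        rw [PySem.Chars.isIn_eq_false_iff]
        intro hinf
        have : '_' ∈ w.toList := (List.singleton_infix_iff _ _).1 hinf
        have := hall _ this
        simp [PySem.Chars.islower] at this
      have hascii : w.toList.all (fun c => decide (c.toNat < 128)) = true := by
        rw [List.all_eq_true]
        intro c hc
        have := islower_toNat (hall c hc)
        simp; omega
      rw [triple_agree hlow]
      simp only [halpha, hany, hnoup, hus, hascii, hlow, Bool.and_self, Bool.not_true,
        Bool.not_false, Bool.false_eq_true, if_false, Bool.true_and]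
      by_cases hlen : 3 ≤ w.length ∧ w.length ≤ 20
      · have f1 : decide (w.length < 3) = false := decide_eq_false (by omega)
        have f2 : decide (20 < w.length) = false := decide_eq_false (by omega)
        have f3 : decide (3 ≤ w.length) = true := decide_eq_true hlen.1
        have f4 : decide (w.length ≤ 20) = true := decide_eq_true hlen.2
        by_cases hT : pvHasTriple w.toList = true <;>
          by_cases hCE : w ∈ (pvExcludedWords : List String) <;>
            by_cases hCP : w ∈ (pvProfanityWords : List String) <;>
              simp [f1, f2, f3, f4, hT, hCE, hCP]
      · rcases not_and_or.1 hlen with h | h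
        · have f1 : decide (w.length < 3) = true := decide_eq_true (by omega)
          have f3 : decide (3 ≤ w.length) = false := decide_eq_false h
          simp [f1, f3]
        · have f2 : decide (20 < w.length) = true := decide_eq_true (by omega)
          have f4 : decide (w.length ≤ 20) = false := decide_eq_false h
          simp [f2, f4]
  · -- some char is not a-z: A's first guard fails, B's scan fails
    have hg1 : (PySem.Str.strIsalpha w
        && (w.toList.any PySem.Chars.islower && w.toList.all fun c => !PySem.Chars.isupper c)
        && !PySem.Str.isIn "_" w) = false := by
      by_contra hb
      simp only [Bool.not_eq_false, Bool.and_eq_true] at hb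
      obtain ⟨⟨ha, -, hup⟩, -⟩ := hb
      apply hlow
      rw [List.all_eq_true]
      intro c hc
      have ha' : PySem.Chars.isalpha c = true := by
        rw [PySem.Str.strIsalpha_eq] at ha
        simp only [PySem.Chars.strIsalpha, Bool.and_eq_true, List.all_eq_true] at ha
        exact ha.2 c hc
      have hup' := List.all_eq_true.1 hup c hc
      simp [PySem.Chars.isalpha] at ha'
      rcases ha' with h | h
      · simp [h] at hup'
      · exact h
    have hlowf : (w.toList.all PySem.Chars.islower) = false := by simpa using hlow
    rw [hg1, hlowf]
    simp

-- ===== VERDICT (by name: the statement is the Claim_ definition above) =====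
theorem is_valid_result_word_spec : Claim_equal_is_valid_result_word := by
  intro w _
  unfold Spec_is_valid_result_word
  exact main_eq w
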